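-- pv_equiv track=rewrite | github.com/rakshittrattha/encoding-singnal | B8ZS.py | encode_b8zs
-- ===== SOURCE A (Python) =====
-- def encode_b8zs(bits):
--     encoded_signal = []
--     zero_count = 0
--     current_polarity = 1  # Initial polarity for '1' bits
--
--     for bit in bits:
--         if bit == '1':
--             encoded_signal.append(current_polarity)
--             zero_count = 0
--             current_polarity = -current_polarity  # Alternate polarity for subsequent '1'
--         elif bit == '0':
--             zero_count += 1
--             if zero_count == 8:
--                 # Substitution pattern for 8 consecutive zeros
--                 # Substitutes: 000VB0VB (V = voltage level, B = bipolar sign change)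
--                 for _ in range(7):  # Remove the last 7 zeros
--                     encoded_signal.pop()
--                 encoded_signal.extend([0, 0, 0, -current_polarity, current_polarity, 0, current_polarity, -current_polarity])
--                 zero_count = 0  # Reset zero counter after substitution
--             else:
--                 encoded_signal.append(0)  # Append zero for each '0' bit
--
--     # Append the last voltage level for completeness in the graph
--     encoded_signal.append(encoded_signal[-1])
--     return encoded_signal
-- ===== SOURCE B (Python) =====
-- def encode_b8zs(bits):
--     # Run-based encoder: split the cleaned bit string on '1' into zero-runs;
--     # each run of k zeros encodes as k//8 substitution blocks plus k%8 plain zeros.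
--     runs = ''.join(c for c in bits if c in '01').split('1')
--     out = []
--     pol = 1
--     for run in runs[:-1]:
--         q, r = divmod(len(run), 8)
--         out += [0, 0, 0, -pol, pol, 0, pol, -pol] * q + [0] * r
--         out.append(pol)
--         pol = -pol
--     q, r = divmod(len(runs[-1]), 8)
--     out += [0, 0, 0, -pol, pol, 0, pol, -pol] * q + [0] * r
--     out.append(out[-1])
--     return out
-- ===== Notes on version B (the rewrite author's own statement) =====
-- stated objective: alternative
-- what changed: B drops A's per-character state machine with its pop() retraction: it filters the bit characters, splits on '1' into zero-runs, and encodes each run in closed form as (len//8) substitution blocks plus (len%8) zeros, alternating polarity between runs.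
import Mathlib
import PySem

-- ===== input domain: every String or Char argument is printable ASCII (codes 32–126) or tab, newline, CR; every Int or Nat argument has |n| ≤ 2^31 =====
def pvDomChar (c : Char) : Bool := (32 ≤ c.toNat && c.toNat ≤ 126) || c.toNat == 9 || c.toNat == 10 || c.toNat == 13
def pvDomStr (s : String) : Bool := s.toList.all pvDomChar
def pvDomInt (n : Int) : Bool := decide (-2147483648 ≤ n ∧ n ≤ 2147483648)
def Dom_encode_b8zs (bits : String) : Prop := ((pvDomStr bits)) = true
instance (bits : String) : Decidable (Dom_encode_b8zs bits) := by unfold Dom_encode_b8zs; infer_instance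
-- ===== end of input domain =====

-- B replaces A's per-character state machine (with its pop() retraction) by a run-based
-- encoder: split on '1' into zero-runs and encode each run in closed form (simpler; same cost).

-- ===== PORT A =====
-- A's loop state: (encoded_signal, zero_count, current_polarity).
-- The 7 pop() calls are transliterated as 7 dropLast steps (exact: list.pop() = dropLast
-- on a nonempty list, and the list always has ≥ 7 elements when this branch runs).
def stepA (st : List Int × Nat × Int) (bit : Char) : List Int × Nat × Int :=
  let (sig, zc, pol) := st
  if bit = '1' then (sig ++ [pol], 0, -pol)
  else if bit = '0' then
    let zc' := zc + 1
    if zc' = 8 then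
      let sig' := (List.range 7).foldl (fun l _ => l.dropLast) sig
      (sig' ++ [0, 0, 0, -pol, pol, 0, pol, -pol], 0, pol)
    else (sig ++ [(0 : Int)], zc', pol)
  else st

-- encoded_signal[-1] raises IndexError on the empty list; Pre_ excludes that, the
-- port returns [] there (junk outside Pre_).
def encode_b8zs (bits : String) : List Int :=
  let st := bits.toList.foldl stepA ([], 0, 1)
  match PySem.List.pyGet? st.1 (-1) with
  | some v => st.1 ++ [v]
  | none => []

-- ===== PORT B =====
-- the B8ZS substitution pattern for the current polarity
def patternB (pol : Int) : List Int := [0, 0, 0, -pol, pol, 0, pol, -pol]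

-- encoding of one run of k consecutive zeros: pattern * (k // 8) + [0] * (k % 8)
def runChunk (pol : Int) (k : Nat) : List Int :=
  (List.replicate (k / 8) (patternB pol)).flatten ++ List.replicate (k % 8) 0

-- body of B's loop over runs[:-1]
def stepRun (st : List Int × Int) (run : List Char) : List Int × Int :=
  (st.1 ++ runChunk st.2 run.length ++ [st.2], -st.2)

-- out[-1] raises IndexError on the empty list; Pre_ excludes that, the port returns [] there.
def encode_b8zs_alt (bits : String) : List Int :=
  let runs := (bits.toList.filter (fun c => c == '0' || c == '1')).splitOn '1'
  let st := runs.dropLast.foldl stepRun ([], 1)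
  let out := st.1 ++ runChunk st.2 (runs.getLast?.getD []).length
  match PySem.List.pyGet? out (-1) with
  | some v => out ++ [v]
  | none => []

-- ===== PRECONDITION & SPEC =====
-- Pre_ excludes exactly the inputs containing no '0' and no '1' character: there both
-- Pythons raise IndexError on encoded_signal[-1] / out[-1] (the list is empty).
def Pre_encode_b8zs (bits : String) : Prop := '0' ∈ bits.toList ∨ '1' ∈ bits.toList
instance (bits : String) : Decidable (Pre_encode_b8zs bits) := by unfold Pre_encode_b8zs; infer_instance
def pvWitness_encode_b8zs : String := "10000000001"
def Spec_encode_b8zs (bits : String) (out : List Int) : Prop := out = encode_b8zs_alt bits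
instance (bits : String) (out : List Int) : Decidable (Spec_encode_b8zs bits out) := by unfold Spec_encode_b8zs; infer_instance

-- ===== CLAIM (what is proved, stated in full; the proofs are below) =====
def Claim_equal_encode_b8zs : Prop := ∀ (bits : String), Dom_encode_b8zs bits → Pre_encode_b8zs bits → Spec_encode_b8zs bits (encode_b8zs bits)

-- ===== LEMMAS AND PROOFS =====

-- popping 7 times off a list ending in 7 zeros recovers the prefix
lemma drop7 (b : List Int) :
    List.foldl (fun l _ => l.dropLast) (b ++ [0, 0, 0, 0, 0, 0, 0]) (List.range 7) = b := by
  have h : b ++ ([0, 0, 0, 0, 0, 0, 0] : List Int)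
      = ((((((b ++ [0]) ++ [0]) ++ [0]) ++ [0]) ++ [0]) ++ [0]) ++ [0] := by
    simp
  rw [h]
  simp [List.range_succ]

-- non-bit characters leave A's state unchanged, so folding over the filtered list is the same
lemma foldA_filter (l : List Char) : ∀ st,
    l.foldl stepA st = (l.filter (fun c => c == '0' || c == '1')).foldl stepA st := by
  induction l with
  | nil => intro st; rfl
  | cons c t ih =>
    intro st
    by_cases h1 : c = '1'
    · simp [h1, List.foldl_cons, ih]
    · by_cases h0 : c = '0'
      · simp [h0, List.foldl_cons, ih]
      · have hstep : stepA st c = st := by simp [stepA, h0, h1]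
        simp [h0, h1, List.foldl_cons, hstep, ih]

-- a short zero block (stays under 8) just appends zeros and counts
lemma foldA_small (r : Nat) : ∀ (sig : List Int) (z : Nat) (pol : Int), z + r ≤ 7 →
    (List.replicate r '0').foldl stepA (sig, z, pol)
      = (sig ++ List.replicate r 0, z + r, pol) := by
  induction r with
  | zero => intro sig z pol _; simp
  | succ n ih =>
    intro sig z pol h
    rw [List.replicate_succ, List.foldl_cons]
    have hz : ¬ (z + 1 = 8) := by omega
    have hstep : stepA (sig, z, pol) '0' = (sig ++ [0], z + 1, pol) := by
      simp [stepA, hz]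
    rw [hstep, ih (sig ++ [0]) (z + 1) pol (by omega)]
    simp only [Prod.mk.injEq]
    refine ⟨by simp [List.append_assoc, List.replicate_succ], by omega, trivial⟩

-- exactly eight zeros from a fresh counter produce the substitution pattern
lemma foldA_eight (sig : List Int) (pol : Int) :
    (List.replicate 8 '0').foldl stepA (sig, 0, pol) = (sig ++ patternB pol, 0, pol) := by
  have h7 := foldA_small 7 sig 0 pol (by omega)
  have h87 : (List.replicate 8 '0') = List.replicate 7 '0' ++ ['0'] := by decide
  rw [h87, List.foldl_append, h7]
  have hrep : List.replicate 7 (0 : Int) = [0, 0, 0, 0, 0, 0, 0] := by decide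
  simp only [hrep, List.foldl_cons, List.foldl_nil]
  simp [stepA, drop7, patternB]

-- closed form for a whole zero-run of length k
lemma foldA_run (k : Nat) : ∀ (sig : List Int) (pol : Int),
    (List.replicate k '0').foldl stepA (sig, 0, pol)
      = (sig ++ runChunk pol k, k % 8, pol) := by
  induction k using Nat.strong_induction_on with
  | _ k ih =>
    intro sig pol
    by_cases h : k < 8
    · rw [foldA_small k sig 0 pol (by omega)]
      have hq : k / 8 = 0 := Nat.div_eq_of_lt h
      have hr : k % 8 = k := Nat.mod_eq_of_lt h
      simp [runChunk, hq, hr]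
    · obtain ⟨k', rfl⟩ : ∃ k', k = 8 + k' := ⟨k - 8, by omega⟩
      rw [List.replicate_add, List.foldl_append, foldA_eight, ih k' (by omega)]
      have hq : (8 + k') / 8 = k' / 8 + 1 := by omega
      have hr : (8 + k') % 8 = k' % 8 := by omega
      simp [runChunk, hq, hr, List.replicate_succ]

-- a list of only-'0' runs is a list of zero replicates
lemma run_replicate {r : List Char} (h : ∀ c ∈ r, c = '0') : r = List.replicate r.length '0' :=
  List.eq_replicate_length.2 h

-- main invariant: A folded over the intercalation of the runs equals B's run loop
lemma foldA_runs (rs : List (List Char)) : ∀ (lastR : List Char) (sig : List Int) (pol : Int),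
    (∀ r ∈ rs, ∀ c ∈ r, c = '0') → (∀ c ∈ lastR, c = '0') →
    (List.intercalate ['1'] (rs ++ [lastR])).foldl stepA (sig, 0, pol)
      = (let st := rs.foldl stepRun (sig, pol);
         (st.1 ++ runChunk st.2 lastR.length, lastR.length % 8, st.2)) := by
  induction rs with
  | nil =>
    intro lastR sig pol _ hl
    have h1 : List.intercalate ['1'] [lastR] = lastR := by
      simp [List.intercalate, List.intersperse]
    rw [List.nil_append, h1, run_replicate hl, foldA_run]
    simp
  | cons r rs ih =>
    intro lastR sig pol hrs hl
    obtain ⟨b, bs, hb⟩ : ∃ b bs, rs ++ [lastR] = b :: bs := by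
      cases rs with
      | nil => exact ⟨lastR, [], rfl⟩
      | cons x xs => exact ⟨x, xs ++ [lastR], rfl⟩
    have hinter : List.intercalate ['1'] ((r :: rs) ++ [lastR])
        = r ++ '1' :: List.intercalate ['1'] (rs ++ [lastR]) := by
      rw [List.cons_append, hb, List.intercalate, List.intersperse_cons₂, ← hb]
      simp [List.intercalate]
    rw [hinter, List.foldl_append]
    have hr : ∀ c ∈ r, c = '0' := hrs r (by simp)
    rw [run_replicate hr, foldA_run, List.foldl_cons]
    have hstep : stepA (sig ++ runChunk pol r.length, r.length % 8, pol) '1'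
        = (sig ++ runChunk pol r.length ++ [pol], 0, -pol) := by simp [stepA]
    rw [hstep, ih lastR _ (-pol) (fun x hx => hrs x (by simp [hx])) hl]
    simp [stepRun]

-- a piece of splitOnP contains only elements of the list on which p is false
lemma mem_splitOnP_piece (p : Char → Bool) : ∀ (l : List Char), ∀ r ∈ l.splitOnP p,
    ∀ c ∈ r, c ∈ l ∧ p c = false := by
  intro l
  induction l with
  | nil =>
    intro r hr c hc
    rw [List.splitOnP_nil] at hr
    simp at hr; subst hr; simp at hc
  | cons a t ih =>
    intro r hr c hc
    rw [List.splitOnP_cons] at hr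
    by_cases ha : p a
    · rw [if_pos ha] at hr
      rcases List.mem_cons.1 hr with h | h
      · subst h; simp at hc
      · obtain ⟨h1, h2⟩ := ih r h c hc
        exact ⟨List.mem_cons_of_mem _ h1, h2⟩
    · rw [if_neg ha] at hr
      rcases hs : t.splitOnP p with - | ⟨hd, tl⟩
      · exact absurd hs (List.splitOnP_ne_nil _ t)
      · rw [hs, List.modifyHead_cons] at hr
        rcases List.mem_cons.1 hr with h | h
        · subst h
          rcases List.mem_cons.1 hc with h' | h'
          · subst h'; exact ⟨by simp, by simpa using ha⟩
          · obtain ⟨h1, h2⟩ := ih hd (by rw [hs]; simp) c h'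
            exact ⟨List.mem_cons_of_mem _ h1, h2⟩
        · obtain ⟨h1, h2⟩ := ih r (by rw [hs]; exact List.mem_cons_of_mem _ h) c hc
          exact ⟨List.mem_cons_of_mem _ h1, h2⟩

-- pieces produced by splitOn '1' on a cleaned bit list consist of '0' only
lemma splitOn_pieces (l : List Char) (hl : ∀ c ∈ l, c = '0' ∨ c = '1') :
    ∀ r ∈ l.splitOn '1', ∀ c ∈ r, c = '0' := by
  intro r hr c hc
  obtain ⟨hmem, hp⟩ := mem_splitOnP_piece (· == '1') l r hr c hc
  rcases hl c hmem with h | h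
  · exact h
  · simp [h] at hp

-- the two final lists coincide on every input
lemma lists_eq (bits : String) : encode_b8zs bits = encode_b8zs_alt bits := by
  unfold encode_b8zs encode_b8zs_alt
  set l := bits.toList.filter (fun c => c == '0' || c == '1') with hldef
  have hl : ∀ c ∈ l, c = '0' ∨ c = '1' := by
    intro c hc
    have := List.of_mem_filter hc
    simpa using this
  set runs := l.splitOn '1' with hruns
  have hne : runs ≠ [] := List.splitOnP_ne_nil _ l
  have hsplit : runs.dropLast ++ [runs.getLast hne] = runs := List.dropLast_append_getLast hne
  have hback : List.intercalate ['1'] (runs.dropLast ++ [runs.getLast hne]) = l := by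
    rw [hsplit, hruns, List.intercalate_splitOn]
  have hpieces := splitOn_pieces l hl
  have hfold := foldA_runs runs.dropLast (runs.getLast hne) [] 1
      (fun r hr => hpieces r (by rw [← hruns, ← hsplit]; exact List.mem_append_left _ hr))
      (hpieces (runs.getLast hne) (by rw [← hruns]; exact List.getLast_mem hne))
  rw [hback] at hfold
  rw [foldA_filter, ← hldef, hfold]
  have hgl : (runs.getLast?.getD []) = runs.getLast hne := by
    rw [List.getLast?_eq_some_getLast hne]; rfl
  simp [hgl]

-- ===== VERDICT (by name: the statement is the Claim_ definition above) =====
theorem encode_b8zs_spec : Claim_equal_encode_b8zs := by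
  intro bits _ _
  unfold Spec_encode_b8zs
  exact lists_eq bits
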